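-- pv_equiv track=rewrite | github.com/shidi1985/L2RPN | codalab_tools/scoring_program/evaluate.py | html_text
-- ===== SOURCE A (Python) =====
-- def html_text(fig_list):
--     html = """<html><head></head><body>\n"""
--     for i,figure in enumerate(fig_list):
--         if i %4==0 :
--             html+= "<hr> scenario {}<br>".format(i//4)
--         html += '<img src="data:image/png;base64,{0}"><br>'.format(figure)
--
--     html += """</body></html>"""
--
--     return html
-- ===== SOURCE B (Python) =====
-- def html_text(fig_list):
--     parts = ["<html><head></head><body>\n"]
--     for j in range(0, len(fig_list), 4):
--         parts.append("<hr> scenario {}<br>".format(j // 4))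
--         for figure in fig_list[j:j + 4]:
--             parts.append('<img src="data:image/png;base64,{}"><br>'.format(figure))
--     parts.append("</body></html>")
--     return "".join(parts)
-- ===== Notes on version B (the rewrite author's own statement) =====
-- stated objective: alternative
-- what changed: Replaces the flat enumerate loop with an i%4 branch and repeated string += by a chunked traversal (range(0,n,4) over scenario blocks, slicing each block of 4 figures) that collects the pieces in a list and joins once at the end.
import Mathlib
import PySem

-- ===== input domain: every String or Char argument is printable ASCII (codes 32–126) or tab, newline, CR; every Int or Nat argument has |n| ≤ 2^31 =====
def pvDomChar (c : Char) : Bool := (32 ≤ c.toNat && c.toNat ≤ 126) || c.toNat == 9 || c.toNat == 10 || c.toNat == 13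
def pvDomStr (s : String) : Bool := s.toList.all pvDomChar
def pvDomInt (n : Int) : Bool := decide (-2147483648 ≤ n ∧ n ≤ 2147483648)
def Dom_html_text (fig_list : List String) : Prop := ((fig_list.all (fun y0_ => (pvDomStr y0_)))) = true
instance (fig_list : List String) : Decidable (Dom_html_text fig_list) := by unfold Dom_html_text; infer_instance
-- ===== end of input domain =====

-- B replaces A's flat enumerate loop (i%4 branch, string +=) by a chunked scenario/figure
-- traversal that collects the pieces in a list and joins once at the end.

-- ===== PORT A =====
def html_text (fig_list : List String) : String :=
  let html := "<html><head></head><body>\n"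
  let html := (PySem.List.enumerate fig_list 0).foldl
    (fun html p =>
      let html := if PySem.Int.mod p.1 4 == 0 then
          html ++ "<hr> scenario " ++ PySem.Int.toStr (PySem.Int.floordiv p.1 4) ++ "<br>"
        else html
      html ++ "<img src=\"data:image/png;base64," ++ p.2 ++ "\"><br>") html
  html ++ "</body></html>"

-- ===== PORT B =====
def html_text_alt (fig_list : List String) : String :=
  let parts := ["<html><head></head><body>\n"]
  let parts := (PySem.List.pyRange 0 (fig_list.length : Int) 4).foldl
    (fun parts j =>
      let parts := parts ++ ["<hr> scenario " ++ PySem.Int.toStr (PySem.Int.floordiv j 4) ++ "<br>"]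
      (PySem.List.slice fig_list (some j) (some (j + 4))).foldl
        (fun parts figure => parts ++ ["<img src=\"data:image/png;base64," ++ figure ++ "\"><br>"])
        parts) parts
  PySem.Str.join "" (parts ++ ["</body></html>"])

-- ===== PRECONDITION & SPEC =====
def Spec_html_text (fig_list : List String) (out : String) : Prop := out = html_text_alt fig_list
instance (fig_list : List String) (out : String) : Decidable (Spec_html_text fig_list out) := by unfold Spec_html_text; infer_instance

-- ===== CLAIM (what is proved, stated in full; the proofs are below) =====
def Claim_equal_html_text : Prop := ∀ (fig_list : List String), Dom_html_text fig_list → Spec_html_text fig_list (html_text fig_list)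

-- ===== LEMMAS AND PROOFS =====

/-- A's loop body, named for the proofs (definitionally the lambda inside `html_text`). -/
def stepA (html : String) (p : Int × String) : String :=
  (if PySem.Int.mod p.1 4 == 0 then
      html ++ "<hr> scenario " ++ PySem.Int.toStr (PySem.Int.floordiv p.1 4) ++ "<br>"
    else html) ++ "<img src=\"data:image/png;base64," ++ p.2 ++ "\"><br>"

/-- B's outer loop body, named for the proofs (definitionally the lambda inside `html_text_alt`). -/
def stepB (fig_list : List String) (parts : List String) (j : Int) : List String :=
  (PySem.List.slice fig_list (some j) (some (j + 4))).foldl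
    (fun parts figure => parts ++ ["<img src=\"data:image/png;base64," ++ figure ++ "\"><br>"])
    (parts ++ ["<hr> scenario " ++ PySem.Int.toStr (PySem.Int.floordiv j 4) ++ "<br>"])

def img (f : String) : String := "<img src=\"data:image/png;base64," ++ f ++ "\"><br>"
def hdr (k : Nat) : String := "<hr> scenario " ++ PySem.Int.toStr (k : Int) ++ "<br>"

/-- concatenation of a list of strings -/
def strcat (l : List String) : String := l.foldr (· ++ ·) ""

/-- the HTML pieces for the figures `xs`, whose first figure opens scenario `k` -/
def pieces (k : Nat) (xs : List String) : List String :=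
  match xs with
  | [] => []
  | x :: rest => hdr k :: ((x :: rest).take 4).map img ++ pieces (k + 1) ((x :: rest).drop 4)
termination_by xs.length
decreasing_by simp

lemma strcat_append (l₁ l₂ : List String) : strcat (l₁ ++ l₂) = strcat l₁ ++ strcat l₂ := by
  induction l₁ with
  | nil => simp [strcat]
  | cons x xs ih => simp only [strcat, List.foldr_cons, List.cons_append] at ih ⊢
                    rw [ih, String.append_assoc]

lemma join_empty (parts : List String) : PySem.Str.join "" parts = strcat parts := by
  apply String.toList_inj.mp
  rw [PySem.Str.toList_join]
  induction parts with
  | nil => simp [PySem.Chars.join_nil, strcat]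
  | cons p ps ih =>
    cases ps with
    | nil => simp [PySem.Chars.join_singleton, strcat]
    | cons q qs =>
      rw [List.map_cons, List.map_cons, PySem.Chars.join_cons_cons]
      rw [List.map_cons] at ih
      simp only [strcat, List.foldr_cons, String.toList_append] at ih ⊢
      simp at ih ⊢
      rw [ih]

lemma c0 (k : Nat) : (PySem.Int.mod ((4 * k : Nat) : Int) 4 == 0) = true := by
  rw [PySem.Int.mod_eq_emod_of_pos (by norm_num)]
  have h : ((4 * k : Nat) : Int) % 4 = 0 := by omega
  rw [h]; decide
lemma c1 (k : Nat) : (PySem.Int.mod (((4 * k : Nat) : Int) + 1) 4 == 0) = false := by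
  rw [PySem.Int.mod_eq_emod_of_pos (by norm_num)]
  have h : (((4 * k : Nat) : Int) + 1) % 4 = 1 := by omega
  rw [h]; decide
lemma c2 (k : Nat) : (PySem.Int.mod (((4 * k : Nat) : Int) + 1 + 1) 4 == 0) = false := by
  rw [PySem.Int.mod_eq_emod_of_pos (by norm_num)]
  have h : (((4 * k : Nat) : Int) + 1 + 1) % 4 = 2 := by omega
  rw [h]; decide
lemma c3 (k : Nat) : (PySem.Int.mod (((4 * k : Nat) : Int) + 1 + 1 + 1) 4 == 0) = false := by
  rw [PySem.Int.mod_eq_emod_of_pos (by norm_num)]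
  have h : (((4 * k : Nat) : Int) + 1 + 1 + 1) % 4 = 3 := by omega
  rw [h]; decide
lemma d0 (k : Nat) : PySem.Int.floordiv ((4 * k : Nat) : Int) 4 = (k : Int) := by
  rw [PySem.Int.floordiv_eq_ediv_of_pos (by norm_num)]; omega

set_option maxRecDepth 8192 in
lemma A_side : ∀ (m : Nat) (xs : List String), xs.length ≤ m → ∀ (k : Nat) (acc : String),
    (PySem.List.enumerate xs ((4 * k : Nat) : Int)).foldl stepA acc = acc ++ strcat (pieces k xs) := by
  intro m
  induction m with
  | zero =>
    intro xs hxs k acc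
    have hx : xs = [] := List.eq_nil_of_length_eq_zero (by omega)
    subst hx
    simp [PySem.List.enumerate_nil, pieces, strcat]
  | succ m ih =>
    intro xs hxs k acc
    match xs with
    | [] => simp [PySem.List.enumerate_nil, pieces, strcat]
    | [a] =>
      simp only [PySem.List.enumerate_cons, PySem.List.enumerate_nil, List.foldl_cons,
        List.foldl_nil, stepA, c0 k, d0 k]
      apply String.toList_inj.mp
      simp [pieces, strcat, hdr, img, String.toList_append]
    | [a, b] =>
      simp only [PySem.List.enumerate_cons, PySem.List.enumerate_nil, List.foldl_cons,
        List.foldl_nil, stepA, c0 k, c1 k, d0 k]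
      apply String.toList_inj.mp
      simp [pieces, strcat, hdr, img, String.toList_append]
    | [a, b, c] =>
      simp only [PySem.List.enumerate_cons, PySem.List.enumerate_nil, List.foldl_cons,
        List.foldl_nil, stepA, c0 k, c1 k, c2 k, d0 k]
      apply String.toList_inj.mp
      simp [pieces, strcat, hdr, img, String.toList_append]
    | a :: b :: c :: d :: rest =>
      have hs : ((4 * k : Nat) : Int) + 1 + 1 + 1 + 1 = ((4 * (k + 1) : Nat) : Int) := by
        push_cast; ring
      have hrec := ih rest (by simp at hxs; omega) (k + 1)
      simp only [PySem.List.enumerate_cons, List.foldl_cons, hs, stepA, c0 k, c1 k, c2 k, c3 k,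
        d0 k]
      rw [hrec]
      apply String.toList_inj.mp
      simp [pieces, strcat, hdr, img, String.toList_append]

lemma pyRange_nil4 (a b : Int) (h : b ≤ a) : PySem.List.pyRange a b 4 = [] := by
  rw [PySem.List.pyRange_of_pos a b (by norm_num)]
  simp [not_lt.mpr h]

lemma pyRange_cons4 (a b : Int) (h : a < b) :
    PySem.List.pyRange a b 4 = a :: PySem.List.pyRange (a + 4) b 4 := by
  rw [PySem.List.pyRange_of_pos a b (by norm_num),
      PySem.List.pyRange_of_pos (a + 4) b (by norm_num)]
  have hn : ((b - a + 4 - 1) / 4).toNat =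
      (if a + 4 < b then ((b - (a + 4) + 4 - 1) / 4).toNat else 0) + 1 := by
    split_ifs with h4 <;> omega
  rw [if_pos h, hn, List.range_succ_eq_map]
  simp [Function.comp, mul_add, add_assoc, add_comm]

lemma B_side : ∀ (m : Nat) (fl : List String) (k : Nat) (parts : List String),
    fl.length - 4 * k ≤ m →
    (PySem.List.pyRange ((4 * k : Nat) : Int) (fl.length : Int) 4).foldl (stepB fl) parts
      = parts ++ pieces k (fl.drop (4 * k)) := by
  intro m
  induction m with
  | zero =>
    intro fl k parts h
    have hge : fl.length ≤ 4 * k := by omega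
    rw [pyRange_nil4 _ _ (by exact_mod_cast hge), List.drop_eq_nil_of_le hge]
    simp [pieces]
  | succ m ih =>
    intro fl k parts h
    by_cases hlt : 4 * k < fl.length
    · rw [pyRange_cons4 _ _ (by exact_mod_cast hlt)]
      simp only [List.foldl_cons]
      have hs : ((4 * k : Nat) : Int) + 4 = ((4 * (k + 1) : Nat) : Int) := by push_cast; ring
      rw [hs, ih fl (k + 1) _ (by omega)]
      have hslice : PySem.List.slice fl (some ((4 * k : Nat) : Int))
          (some (((4 * k : Nat) : Int) + 4)) = (fl.drop (4 * k)).take 4 := by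
        rw [PySem.List.slice_toNat fl (by positivity) (by positivity)]
        have h1 : (((4 * k : Nat) : Int)).toNat = 4 * k := by omega
        have h2 : ((((4 * k : Nat) : Int)) + 4).toNat = 4 * k + 4 := by omega
        rw [h1, h2]
        congr 1
        omega
      simp only [stepB]
      rw [hslice, PySem.List.foldl_append_singleton_eq_map, d0 k]
      have himg : (fun figure => "<img src=\"data:image/png;base64," ++ figure ++ "\"><br>") = img := by
        funext f; rfl
      rw [himg]
      have hdd : fl.drop (4 * (k + 1)) = (fl.drop (4 * k)).drop 4 := by
        have h44 : 4 * k + 4 = 4 * (k + 1) := by ring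
        rw [List.drop_drop, h44]
      rw [hdd]
      cases hd : fl.drop (4 * k) with
      | nil =>
        exfalso
        have := List.drop_eq_nil_iff.mp hd
        omega
      | cons y ys => simp [pieces, hdr, List.append_assoc]
    · have hge : fl.length ≤ 4 * k := by omega
      rw [pyRange_nil4 _ _ (by exact_mod_cast hge), List.drop_eq_nil_of_le hge]
      simp [pieces]

-- ===== VERDICT (by name: the statement is the Claim_ definition above) =====
theorem html_text_spec : Claim_equal_html_text := by
  intro fl _
  unfold Spec_html_text
  have hz : ((4 * 0 : Nat) : Int) = 0 := by norm_num
  have hA := A_side fl.length fl le_rfl 0 "<html><head></head><body>\n"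
  have hB := B_side fl.length fl 0 ["<html><head></head><body>\n"] (by omega)
  rw [hz] at hA hB
  simp only [Nat.mul_zero, List.drop_zero] at hB
  show (PySem.List.enumerate fl 0).foldl stepA "<html><head></head><body>\n" ++ "</body></html>"
      = PySem.Str.join "" ((PySem.List.pyRange 0 (fl.length : Int) 4).foldl (stepB fl)
          ["<html><head></head><body>\n"] ++ ["</body></html>"])
  rw [hA, hB, join_empty, strcat_append, strcat_append]
  apply String.toList_inj.mp
  simp [strcat, String.toList_append, String.append_assoc]
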